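-- pv_equiv track=rewrite | github.com/PabloR03/LFP_S2_2023_Proyecto2_202201947 | Cadenas.py | Comentariol
-- ===== SOURCE A (Python) =====
-- def Comentariol(cadena):
--     lexemas = []  # Creamos una lista para almacenar los lexemas encontrados
--     puntero = 0
--     while puntero < len(cadena):
--         char = cadena[puntero]
--         puntero += 1
--         if char == '#':
--             lexema = Armar_Comentariol(cadena[puntero-1:])
--             if lexema is not None:
--                 lexemas.append(lexema)
--     return lexemas
--
-- def Armar_Comentariol(cadena):
--     lexema = ''
--     for char in cadena:
--         if char == '\n':
--             #consola.cuadroTexto2.insert(tk.END, lexema)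
--             return lexema
--         lexema += char
--     return None
-- ===== SOURCE B (Python) =====
-- def Comentariol(cadena):
--     # One reversed pass: 'cur' holds the text from the current position up to
--     # the next newline (None if no newline lies to the right); each '#' emits
--     # a lexeme.  No full-suffix copies, unlike the per-'#' rescan.
--     lexemas = []
--     cur = None
--     for char in reversed(cadena):
--         if char == '\n':
--             cur = ''
--         elif cur is not None:
--             cur = char + cur
--             if char == '#':
--                 lexemas.append(cur)
--     lexemas.reverse()
--     return lexemas
-- ===== Notes on version B (the rewrite author's own statement) =====
-- stated objective: faster
-- what changed: Replaces the per-'#' copy-and-rescan of the whole remaining suffix with a single reversed pass that maintains the text up to the next newline and emits a lexeme at each '#'.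
import Mathlib
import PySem

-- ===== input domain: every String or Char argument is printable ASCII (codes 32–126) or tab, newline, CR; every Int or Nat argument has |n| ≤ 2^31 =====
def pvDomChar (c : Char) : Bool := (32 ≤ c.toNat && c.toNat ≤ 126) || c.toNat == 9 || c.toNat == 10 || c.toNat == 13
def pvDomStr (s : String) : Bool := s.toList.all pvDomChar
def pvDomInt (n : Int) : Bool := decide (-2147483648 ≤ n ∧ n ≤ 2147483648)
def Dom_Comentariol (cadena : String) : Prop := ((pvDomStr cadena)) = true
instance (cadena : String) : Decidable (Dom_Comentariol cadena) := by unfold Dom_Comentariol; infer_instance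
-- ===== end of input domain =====

-- B rebuilds A's return value by a different algorithm (single reversed pass instead of
-- a full-suffix rescan per '#'); equal output proved on all inputs.

-- ===== PORT A =====
-- Armar_Comentariol: walk the suffix, return the text before the first '\n', or None.
def pvArmar : List Char → List Char → Option (List Char)
  | [], _ => none
  | c :: rest, lexema => if c = '\n' then some lexema else pvArmar rest (lexema ++ [c])

-- the while loop: for each char, if '#', run Armar on the suffix starting there.
def pvLoopA : List Char → List String → List String
  | [], lexemas => lexemas
  | c :: rest, lexemas =>
    if c = '#' then
      match pvArmar (c :: rest) [] with
      | some lx => pvLoopA rest (lexemas ++ [String.mk lx])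
      | none => pvLoopA rest lexemas
    else pvLoopA rest lexemas

def Comentariol (cadena : String) : List String := pvLoopA cadena.toList []

-- ===== PORT B =====
-- one step of Source B's reversed-iteration loop; state = (cur, lexemas-so-far)
def pvStepB (st : Option (List Char) × List String) (c : Char) :
    Option (List Char) × List String :=
  if c = '\n' then (some [], st.2)
  else
    match st.1 with
    | none => st
    | some cur =>
      let cur' := c :: cur
      if c = '#' then (some cur', st.2 ++ [String.mk cur']) else (some cur', st.2)

def Comentariol_alt (cadena : String) : List String :=
  ((cadena.toList.reverse).foldl pvStepB (none, [])).2.reverse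

-- ===== PRECONDITION & SPEC =====
def Spec_Comentariol (cadena : String) (out : List String) : Prop := out = Comentariol_alt cadena
instance (cadena : String) (out : List String) : Decidable (Spec_Comentariol cadena out) := by unfold Spec_Comentariol; infer_instance

-- ===== CLAIM (what is proved, stated in full; the proofs are below) =====
def Claim_equal_Comentariol : Prop := ∀ (cadena : String), Dom_Comentariol cadena → Spec_Comentariol cadena (Comentariol cadena)

-- ===== LEMMAS AND PROOFS =====

-- reference function: the list of comment lexemes, defined structurally
def pvSpecFn : List Char → List String
  | [] => []
  | c :: rest =>
    if c = '#' then
      match pvArmar (c :: rest) [] with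
      | some lx => String.mk lx :: pvSpecFn rest
      | none => pvSpecFn rest
    else pvSpecFn rest

theorem pvArmar_none (cs : List Char) (acc : List Char) (h : '\n' ∉ cs) :
    pvArmar cs acc = none := by
  induction cs generalizing acc with
  | nil => rfl
  | cons c rest ih =>
    simp only [List.mem_cons, not_or] at h
    simp [pvArmar, Ne.symm h.1, ih _ h.2]

theorem pvArmar_some (cs : List Char) (acc : List Char) (h : '\n' ∈ cs) :
    pvArmar cs acc = some (acc ++ cs.takeWhile (· ≠ '\n')) := by
  induction cs generalizing acc with
  | nil => simp at h
  | cons c rest ih =>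
    by_cases hc : c = '\n'
    · subst hc; simp [pvArmar, List.takeWhile]
    · have hrest : '\n' ∈ rest := by
        rcases List.mem_cons.mp h with h1 | h1
        · exact absurd h1.symm hc
        · exact h1
      simp [pvArmar, hc, ih _ hrest, List.takeWhile]

theorem pvLoopA_eq (cs : List Char) (acc : List String) :
    pvLoopA cs acc = acc ++ pvSpecFn cs := by
  induction cs generalizing acc with
  | nil => simp [pvLoopA, pvSpecFn]
  | cons c rest ih =>
    by_cases hc : c = '#'
    · simp only [pvLoopA, pvSpecFn, hc]
      cases h : pvArmar ('#' :: rest) [] with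
      | none => simp [ih]
      | some lx => simp [ih]
    · simp [pvLoopA, pvSpecFn, hc, ih]

theorem pvFoldB_eq (cs : List Char) :
    (cs.reverse).foldl pvStepB (none, []) =
      ((if '\n' ∈ cs then some (cs.takeWhile (· ≠ '\n')) else none),
        (pvSpecFn cs).reverse) := by
  induction cs with
  | nil => simp [pvSpecFn]
  | cons c rest ih =>
    have hstep : ((c :: rest).reverse).foldl pvStepB (none, [])
        = pvStepB ((rest.reverse).foldl pvStepB (none, [])) c := by
      simp [List.foldl_append]
    rw [hstep, ih]
    by_cases hn : c = '\n'
    · subst hn; simp [pvStepB, pvSpecFn, List.takeWhile]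
    · by_cases hr : '\n' ∈ rest
      · have hmem : '\n' ∈ c :: rest := List.mem_cons_of_mem _ hr
        by_cases hc : c = '#'
        · subst hc
          have ha : pvArmar ('#' :: rest) [] =
              some ('#' :: rest.takeWhile (· ≠ '\n')) := by
            rw [pvArmar_some _ _ hmem]
            simp [List.takeWhile, hn]
          simp [pvStepB, hn, hr, hmem, pvSpecFn, ha, List.takeWhile]
        · simp [pvStepB, hn, hr, hmem, hc, pvSpecFn, List.takeWhile]
      · have hmem : '\n' ∉ c :: rest := by
          intro h
          rcases List.mem_cons.mp h with h1 | h1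
          · exact hn h1.symm
          · exact hr h1
        by_cases hc : c = '#'
        · subst hc
          have ha : pvArmar ('#' :: rest) [] = none := pvArmar_none _ _ hmem
          simp [pvStepB, hr, hmem, pvSpecFn, ha]
        · simp [pvStepB, hn, hr, hmem, hc, pvSpecFn]

-- ===== VERDICT (by name: the statement is the Claim_ definition above) =====
theorem Comentariol_spec : Claim_equal_Comentariol := by
  intro cadena _
  unfold Spec_Comentariol Comentariol Comentariol_alt
  rw [pvLoopA_eq, pvFoldB_eq]
  simp
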